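-- pv_equiv track=rewrite | github.com/MDGroup-WatanabeLab/mdpython | Structure/stack.py | sort_coordinate
-- ===== SOURCE A (Python) =====
-- def sort_coordinate(coordinate, atom_type):
--     atom = sorted(set(atom_type), key = atom_type.index)
--     coor = []
--     for i in atom:
--         for j in range(len(atom_type)):
--             if i == atom_type[j]:
--                 coor.append(coordinate[j])
--     return coor
-- ===== SOURCE B (Python) =====
-- def sort_coordinate(coordinate, atom_type):
--     groups = {}
--     for t, c in zip(atom_type, coordinate):
--         groups.setdefault(t, []).append(c)
--     out = []
--     for g in groups.values():
--         out += g
--     return out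
-- ===== Notes on version B (the rewrite author's own statement) =====
-- stated objective: faster
-- what changed: Replaced the sorted(set)+per-type full rescan (one pass over the whole list for every distinct type) by a single pass over zip(atom_type, coordinate) into an insertion-ordered dict of type->coordinates, then one concatenation of the groups.
import Mathlib
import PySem

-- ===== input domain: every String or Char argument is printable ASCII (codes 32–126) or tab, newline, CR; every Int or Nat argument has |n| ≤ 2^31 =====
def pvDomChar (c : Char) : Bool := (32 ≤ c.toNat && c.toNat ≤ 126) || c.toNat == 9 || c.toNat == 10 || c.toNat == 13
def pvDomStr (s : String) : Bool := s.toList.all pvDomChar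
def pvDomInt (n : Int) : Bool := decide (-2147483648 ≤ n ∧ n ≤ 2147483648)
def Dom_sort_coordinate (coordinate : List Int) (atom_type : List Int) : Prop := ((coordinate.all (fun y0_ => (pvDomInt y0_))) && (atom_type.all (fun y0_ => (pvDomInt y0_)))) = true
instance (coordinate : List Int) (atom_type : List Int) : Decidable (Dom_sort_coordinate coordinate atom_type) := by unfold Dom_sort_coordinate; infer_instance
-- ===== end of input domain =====

-- B groups the coordinates by atom type in one pass over zip(atom_type, coordinate) into an
-- insertion-ordered dict and concatenates the groups, instead of A's full rescan per distinct type.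

-- ===== PORT A =====
def sort_coordinate (coordinate : List Int) (atom_type : List Int) : List Int :=
  -- atom = sorted(set(atom_type), key = atom_type.index); the key is injective on the set,
  -- so the result does not depend on the set's iteration order
  let atom := PySem.List.sorted (PySem.Set.ofList atom_type)
      (fun x => (PySem.List.index? atom_type x).getD 0) false
  atom.foldl (fun coor i =>
    (PySem.List.pyRange 0 (atom_type.length : Int) 1).foldl (fun coor j =>
      if i == PySem.List.pyGetD atom_type j 0
      then coor ++ [PySem.List.pyGetD coordinate j 0]   -- coordinate[j]: in range by Pre_
      else coor) coor) []

-- ===== PORT B =====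
def sort_coordinate_alt (coordinate : List Int) (atom_type : List Int) : List Int :=
  let groups := (atom_type.zip coordinate).foldl
      (fun d p => d.modify p.1 [] (fun g => g ++ [p.2])) PySem.Dict.empty
  groups.values.foldl (fun out g => out ++ g) []

-- ===== PRECONDITION & SPEC =====
-- A evaluates coordinate[j] for every j < len(atom_type), so it raises IndexError
-- exactly when coordinate is shorter than atom_type; Pre_ excludes exactly those inputs.
def Pre_sort_coordinate (coordinate : List Int) (atom_type : List Int) : Prop :=
  atom_type.length ≤ coordinate.length
instance (coordinate : List Int) (atom_type : List Int) : Decidable (Pre_sort_coordinate coordinate atom_type) := by unfold Pre_sort_coordinate; infer_instance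
def pvWitness_sort_coordinate : List Int × List Int := ([10, 20, 30, 40], [1, 2, 1, 2])

def Spec_sort_coordinate (coordinate : List Int) (atom_type : List Int) (out : List Int) : Prop := out = sort_coordinate_alt coordinate atom_type
instance (coordinate : List Int) (atom_type : List Int) (out : List Int) : Decidable (Spec_sort_coordinate coordinate atom_type out) := by unfold Spec_sort_coordinate; infer_instance

-- ===== CLAIM (what is proved, stated in full; the proofs are below) =====
def Claim_equal_sort_coordinate : Prop := ∀ (coordinate : List Int) (atom_type : List Int), Dom_sort_coordinate coordinate atom_type → Pre_sort_coordinate coordinate atom_type → Spec_sort_coordinate coordinate atom_type (sort_coordinate coordinate atom_type)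

-- ===== LEMMAS AND PROOFS =====

lemma index_getD_lt_length {xs : List Int} {a : Int} (h : a ∈ xs) :
    (PySem.List.index? xs a).getD 0 < xs.length := by
  obtain ⟨k, hk⟩ := Option.isSome_iff_exists.mp ((PySem.List.index?_isSome_iff xs a).mpr h)
  obtain ⟨pre, suf, hxs, hlen, -⟩ := (PySem.List.index?_eq_some_iff xs a k).mp hk
  subst hxs
  rw [hk]
  simp only [Option.getD_some, List.length_append, List.length_cons]
  omega

lemma ofList_pairwise_index (xs : List Int) :
    (PySem.Set.ofList xs).Pairwise
      (fun a b => (PySem.List.index? xs a).getD 0 < (PySem.List.index? xs b).getD 0) := by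
  induction xs using List.reverseRecOn with
  | nil => simp [PySem.Set.ofList]
  | append_singleton xs x ih =>
    rw [PySem.Set.ofList_append_singleton]
    by_cases hx : x ∈ PySem.Set.ofList xs
    · rw [PySem.Set.add_of_mem hx]
      refine ih.imp_of_mem ?_
      intro a b ha hb hab
      rw [PySem.List.index?_append_of_mem _ ((PySem.Set.mem_ofList xs a).mp ha),
          PySem.List.index?_append_of_mem _ ((PySem.Set.mem_ofList xs b).mp hb)]
      exact hab
    · have hx' : x ∉ xs := fun h => hx ((PySem.Set.mem_ofList xs x).mpr h)
      rw [PySem.Set.add_of_not_mem hx, List.pairwise_append]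
      refine ⟨?_, by simp, ?_⟩
      · refine ih.imp_of_mem ?_
        intro a b ha hb hab
        rw [PySem.List.index?_append_of_mem _ ((PySem.Set.mem_ofList xs a).mp ha),
            PySem.List.index?_append_of_mem _ ((PySem.Set.mem_ofList xs b).mp hb)]
        exact hab
      · intro a ha b hb
        obtain rfl : b = x := by simpa using hb
        have ha' : a ∈ xs := (PySem.Set.mem_ofList xs a).mp ha
        rw [PySem.List.index?_append_of_mem _ ha',
            PySem.List.index?_append_singleton_self xs b hx']
        simpa using index_getD_lt_length ha'


lemma atom_eq (xs : List Int) :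
    PySem.List.sorted (PySem.Set.ofList xs)
      (fun x => (PySem.List.index? xs x).getD 0) false = PySem.Set.ofList xs :=
  PySem.List.sorted_eq_of_perm_of_pairwise_lt _ _ _ (List.Perm.refl _) (ofList_pairwise_index xs)

lemma inner_eq (coordinate atom_type : List Int)
    (h : atom_type.length ≤ coordinate.length) (i : Int) (coor : List Int) :
    (PySem.List.pyRange 0 (atom_type.length : Int) 1).foldl (fun coor j =>
      if i == PySem.List.pyGetD atom_type j 0
      then coor ++ [PySem.List.pyGetD coordinate j 0] else coor) coor
    = coor ++ ((atom_type.zip coordinate).filter (fun p => p.1 == i)).map (·.2) := by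
  have hlen : (atom_type.zip coordinate).length = atom_type.length := by
    rw [List.length_zip]; omega
  rw [← hlen]
  rw [PySem.List.foldl_congr_mem _ _
    (fun acc j => if i == (PySem.List.pyGetD (atom_type.zip coordinate) j (0, 0)).1
      then acc ++ [(PySem.List.pyGetD (atom_type.zip coordinate) j (0, 0)).2] else acc) _ ?_]
  · rw [PySem.List.foldl_pyRange_zero_pyGetD' (atom_type.zip coordinate) (0, 0)
      (fun acc p => if i == p.1 then acc ++ [p.2] else acc) coor]
    rw [PySem.List.foldl_append_if (fun p : Int × Int => i == p.1)
      (fun p : Int × Int => p.2) (atom_type.zip coordinate) coor]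
    rw [List.filter_congr (fun (p : Int × Int) (_ : p ∈ atom_type.zip coordinate) =>
      (Bool.beq_comm : (i == p.1) = (p.1 == i)))]
  · intro acc j hj
    have hj' := PySem.List.mem_pyRange_one.mp hj
    have h0 : 0 ≤ j := hj'.1
    have h1 : j < (atom_type.zip coordinate).length := by exact_mod_cast hj'.2
    simp only []
    rw [PySem.List.pyGetD_eq_getElem (atom_type.zip coordinate) (0, 0) h0 h1,
        PySem.List.pyGetD_eq_getElem atom_type 0 h0 (by rw [hlen] at h1; exact_mod_cast h1),
        PySem.List.pyGetD_eq_getElem coordinate 0 h0 (by rw [List.length_zip] at h1; push_cast at h1 ⊢; omega)]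
    simp [List.getElem_zip]


lemma a_normal (coordinate atom_type : List Int)
    (h : atom_type.length ≤ coordinate.length) :
    sort_coordinate coordinate atom_type =
      (PySem.Set.ofList atom_type).flatMap
        (fun t => ((atom_type.zip coordinate).filter (fun p => p.1 == t)).map (·.2)) := by
  unfold sort_coordinate
  rw [atom_eq]
  rw [PySem.List.foldl_congr_mem _ _
    (fun coor t => coor ++ ((atom_type.zip coordinate).filter (fun p => p.1 == t)).map (·.2)) _
    (fun acc t _ => inner_eq coordinate atom_type h t acc)]
  rw [PySem.List.foldl_append_eq_flatMap]
  simp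

lemma b_normal (coordinate atom_type : List Int)
    (h : atom_type.length ≤ coordinate.length) :
    sort_coordinate_alt coordinate atom_type =
      (PySem.Set.ofList atom_type).flatMap
        (fun t => ((atom_type.zip coordinate).filter (fun p => p.1 == t)).map (·.2)) := by
  unfold sort_coordinate_alt
  dsimp only []
  have hkeys : ((atom_type.zip coordinate).foldl
      (fun d p => d.modify p.1 [] (fun g => g ++ [p.2])) PySem.Dict.empty).keys
      = PySem.Set.ofList atom_type := by
    have := PySem.Dict.keys_foldl_modify_key (atom_type.zip coordinate)
      (fun p : Int × Int => p.1) ([] : List Int)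
      (fun _ p => fun g => g ++ [p.2]) PySem.Dict.empty
    simp only [] at this
    rw [this, PySem.Dict.keys_empty, PySem.Set.update_nil_left, List.map_fst_zip h]
  have hnodup : ((atom_type.zip coordinate).foldl
      (fun d p => d.modify p.1 [] (fun g => g ++ [p.2])) PySem.Dict.empty).keys.Nodup := by
    have := PySem.Dict.nodup_keys_foldl_modify_key (atom_type.zip coordinate)
      (fun p : Int × Int => p.1) ([] : List Int)
      (fun _ p => fun g => g ++ [p.2]) PySem.Dict.empty
      (by rw [PySem.Dict.keys_empty]; exact List.nodup_nil)
    simpa using this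
  have hget : ∀ t : Int, ((atom_type.zip coordinate).foldl
      (fun d p => d.modify p.1 [] (fun g => g ++ [p.2])) PySem.Dict.empty).getD t []
      = ((atom_type.zip coordinate).filter (fun p => p.1 == t)).map (·.2) := by
    intro t
    rw [PySem.Dict.getD_foldl_modify_append (atom_type.zip coordinate) PySem.Dict.empty t]
    simp
  rw [PySem.Dict.values_eq_map_keys _ hnodup []]
  rw [PySem.List.foldl_append_eq_flatMap]
  rw [hkeys]
  simp only [List.nil_append, List.flatMap_map, hget]

-- ===== VERDICT (by name: the statement is the Claim_ definition above) =====
theorem sort_coordinate_spec : Claim_equal_sort_coordinate := by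
  intro co ty _ hpre
  unfold Spec_sort_coordinate
  rw [a_normal co ty hpre, b_normal co ty hpre]
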